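-- pv_equiv track=rewrite | github.com/Effyee/codingtestPython | 백준/Gold/17140. 이차원 배열과 연산/이차원 배열과 연산.py | R_operation
-- ===== SOURCE A (Python) =====
-- from collections import Counter
--
-- def R_operation(A):
--     new_A = []
--     max_len = 0
--
--     for row in A:
--         cnt = Counter(n for n in row if n != 0)  # 0 제외
--         items = sorted(cnt.items(), key=lambda x: (x[1], x[0]))  # (횟수, 숫자) 정렬
--
--         new_row = []
--         for num, freq in items:
--             new_row.append(num)
--             new_row.append(freq)
--
--         max_len = max(max_len, len(new_row))
--         new_A.append(new_row)
--
--     # 모든 행 길이 맞추기, 최대 100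
--     for row in new_A:
--         row += [0] * (max_len - len(row))
--         if len(row) > 100:
--             del row[100:]
--
--     if len(new_A) > 100:
--         new_A = new_A[:100]
--
--     return new_A
-- ===== SOURCE B (Python) =====
-- def R_operation(A):
--     # Sort each row's non-zero values and run-length scan them instead of Counter;
--     # build rows functionally, then pad/truncate with comprehensions.
--     rows = []
--     for row in A:
--         vals = sorted(v for v in row if v != 0)
--         pairs = []
--         i = 0
--         while i < len(vals):
--             j = i
--             while j < len(vals) and vals[j] == vals[i]:
--                 j += 1
--             pairs.append((vals[i], j - i))
--             i = j
--         pairs.sort(key=lambda p: (p[1], p[0]))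
--         rows.append([x for p in pairs for x in p])
--     max_len = max((len(r) for r in rows), default=0)
--     return [(r + [0] * (max_len - len(r)))[:100] for r in rows[:100]]
-- ===== Notes on version B (the rewrite author's own statement) =====
-- stated objective: alternative
-- what changed: Replaces the per-row Counter dict with a sort + two-pointer run-length scan to get (value,count) pairs, and replaces the mutating pad/truncate second loop with max(...,default=0) and a single comprehension over rows[:100].
import Mathlib
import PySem

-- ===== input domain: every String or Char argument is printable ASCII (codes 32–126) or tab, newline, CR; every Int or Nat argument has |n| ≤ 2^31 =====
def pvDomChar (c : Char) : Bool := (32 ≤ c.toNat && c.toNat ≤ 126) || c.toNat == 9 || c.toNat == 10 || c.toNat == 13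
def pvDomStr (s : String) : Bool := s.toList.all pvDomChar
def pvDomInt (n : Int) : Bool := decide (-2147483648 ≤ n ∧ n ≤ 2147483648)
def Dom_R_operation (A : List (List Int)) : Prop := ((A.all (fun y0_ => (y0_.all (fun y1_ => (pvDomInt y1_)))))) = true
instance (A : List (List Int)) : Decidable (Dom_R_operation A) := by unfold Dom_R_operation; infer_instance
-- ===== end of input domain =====

-- B replaces A's Counter-per-row with sort + run-length scan and the in-place pad/truncate
-- loops with comprehensions (objective: alternative decomposition, same asymptotic cost).

-- ===== PORT A =====
-- one row: Counter of the non-zero entries, items sorted by (freq, num), flattened num,freq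
def pvNewRowA (row : List Int) : List Int :=
  let cnt := PySem.Dict.counter (row.filter (fun n => n != 0))
  let items := PySem.List.sorted2 cnt.items (fun x => x.2) (fun x => x.1)
  items.foldl (fun acc p => acc ++ [p.1] ++ [p.2]) []

def R_operation (A : List (List Int)) : List (List Int) :=
  -- first loop: build new_A and the running max_len together (one fold, paired state)
  let st := A.foldl (fun (s : List (List Int) × Int) row =>
      let new_row := pvNewRowA row
      (s.1 ++ [new_row], max s.2 (PySem.List.len new_row))) ([], 0)
  let max_len := st.2
  -- second loop: pad each row with zeros, truncate a row longer than 100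
  let new_A := st.1.map (fun row =>
      let row2 := row ++ PySem.List.pyRepeat [0] (max_len - PySem.List.len row)
      if PySem.List.len row2 > 100 then row2.take 100 else row2)
  if PySem.List.len new_A > 100 then new_A.take 100 else new_A

-- ===== PORT B =====
-- run-length encode a (sorted) list: count the run at the head, recurse on the rest
-- (port of Source B's i/j two-pointer while loops: j-i = takeWhile length + 1, i := j = dropWhile)
def pvRuns (vals : List Int) : List (Int × Int) :=
  match vals with
  | [] => []
  | v :: t =>
      (v, (((t.takeWhile (fun w => w == v)).length + 1 : Nat) : Int)) ::
        pvRuns (t.dropWhile (fun w => w == v))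
termination_by vals.length
decreasing_by simpa using Nat.lt_succ_of_le (List.length_dropWhile_le _ t)

def pvRowB (row : List Int) : List Int :=
  let vals := PySem.List.sorted (row.filter (fun v => v != 0)) (fun x => x) false
  let pairs := PySem.List.sorted2 (pvRuns vals) (fun p => p.2) (fun p => p.1)
  pairs.flatMap (fun p => [p.1, p.2])

def R_operation_alt (A : List (List Int)) : List (List Int) :=
  let rows := A.map pvRowB
  let max_len := PySem.List.maxD (rows.map (fun r => PySem.List.len r)) (fun x => x) 0
  (rows.take 100).map (fun r =>
    (r ++ PySem.List.pyRepeat [0] (max_len - PySem.List.len r)).take 100)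

-- ===== PRECONDITION & SPEC =====
def Spec_R_operation (A : List (List Int)) (out : List (List Int)) : Prop := out = R_operation_alt A
instance (A : List (List Int)) (out : List (List Int)) : Decidable (Spec_R_operation A out) := by unfold Spec_R_operation; infer_instance

-- ===== CLAIM (what is proved, stated in full; the proofs are below) =====
def Claim_equal_R_operation : Prop := ∀ (A : List (List Int)), Dom_R_operation A → Spec_R_operation A (R_operation A)

-- ===== LEMMAS AND PROOFS =====

-- the strict comparator sorted2 uses for key (p.2, p.1), and the weak lex order it sorts by
def pvLt (a b : Int × Int) : Bool :=
  decide (a.2 < b.2) || (!decide (b.2 < a.2) && decide (a.1 < b.1))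

def pvLe (a b : Int × Int) : Prop := a.2 < b.2 ∨ (a.2 = b.2 ∧ a.1 ≤ b.1)

theorem pvLt_false {a b : Int × Int} (h : pvLt a b = false) : pvLe b a := by
  simp [pvLt] at h; unfold pvLe; omega

theorem pvLt_true {a b : Int × Int} (h : pvLt a b = true) : pvLe a b := by
  simp [pvLt] at h; unfold pvLe; omega

theorem pvLe_trans {a b c : Int × Int} (h1 : pvLe a b) (h2 : pvLe b c) : pvLe a c := by
  unfold pvLe at *; omega

theorem pvLe_antisymm {a b : Int × Int} (h1 : pvLe a b) (h2 : pvLe b a) : a = b := by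
  unfold pvLe at *
  have : a.1 = b.1 ∧ a.2 = b.2 := by omega
  exact Prod.ext this.1 this.2

theorem insertBy_pairwise (x : Int × Int) (ys : List (Int × Int))
    (h : ys.Pairwise pvLe) : (PySem.List.insertBy pvLt x ys).Pairwise pvLe := by
  induction ys with
  | nil => simp [PySem.List.insertBy]
  | cons y ys ih =>
      rw [show PySem.List.insertBy pvLt x (y :: ys)
            = if pvLt x y = true then x :: y :: ys else y :: PySem.List.insertBy pvLt x ys from rfl]
      rcases List.pairwise_cons.mp h with ⟨hy, hys⟩
      split_ifs with hlt
      · refine List.pairwise_cons.mpr ⟨?_, h⟩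
        intro z hz
        rcases List.mem_cons.mp hz with rfl | hz
        · exact pvLt_true hlt
        · exact pvLe_trans (pvLt_true hlt) (hy z hz)
      · refine List.pairwise_cons.mpr ⟨?_, ih hys⟩
        intro z hz
        rcases (PySem.List.mem_insertBy pvLt x z ys).mp hz with rfl | hz
        · exact pvLt_false (by simpa using hlt)
        · exact hy z hz

theorem foldl_insertBy_pairwise (xs : List (Int × Int)) (acc : List (Int × Int))
    (h : acc.Pairwise pvLe) :
    (xs.foldl (fun acc x => PySem.List.insertBy pvLt x acc) acc).Pairwise pvLe := by
  induction xs generalizing acc with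
  | nil => exact h
  | cons x xs ih => exact ih _ (insertBy_pairwise x acc h)

theorem sorted2_pairwise_le (xs : List (Int × Int)) :
    (PySem.List.sorted2 xs (fun p => p.2) (fun p => p.1) false).Pairwise pvLe := by
  have hdef : PySem.List.sorted2 xs (fun p : Int × Int => p.2) (fun p => p.1) false
      = xs.foldl (fun acc x => PySem.List.insertBy pvLt x acc) [] := rfl
  rw [hdef]
  exact foldl_insertBy_pairwise xs [] (by simp)

-- sorting a rearrangement by the (count, value) key gives the same list
theorem sorted2_eq_of_perm (xs ys : List (Int × Int)) (h : xs.Perm ys) :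
    PySem.List.sorted2 xs (fun p => p.2) (fun p => p.1) false
      = PySem.List.sorted2 ys (fun p => p.2) (fun p => p.1) false := by
  refine List.Perm.eq_of_pairwise (le := pvLe) (fun a b _ _ h1 h2 => pvLe_antisymm h1 h2)
    (sorted2_pairwise_le xs) (sorted2_pairwise_le ys) ?_
  exact ((PySem.List.sorted2_perm xs _ _ false).trans h).trans
    (PySem.List.sorted2_perm ys _ _ false).symm

-- characterisation of pvRuns on a sorted list
theorem pvRuns_spec (vals : List Int) (hs : vals.Pairwise (· ≤ ·)) :
    (∀ p : Int × Int, p ∈ pvRuns vals ↔ p.1 ∈ vals ∧ p.2 = (vals.count p.1 : Int)) ∧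
    (pvRuns vals).Pairwise (fun a b => a.1 < b.1) := by
  induction vals using pvRuns.induct with
  | case1 => simp [pvRuns]
  | case2 v t ih =>
      have htsplit : t.takeWhile (fun w => w == v) ++ t.dropWhile (fun w => w == v) = t :=
        List.takeWhile_append_dropWhile
      have ht1v : ∀ w ∈ t.takeWhile (fun w => w == v), w = v := fun w hw => by
        simpa using List.mem_takeWhile_imp hw
      have hvle : ∀ w ∈ t, v ≤ w := (List.pairwise_cons.mp hs).1
      have hs2 : (t.dropWhile (fun w => w == v)).Pairwise (· ≤ ·) :=
        List.Pairwise.sublist (List.dropWhile_sublist _) (List.pairwise_cons.mp hs).2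
      have hvlt : ∀ w ∈ t.dropWhile (fun w => w == v), v < w := by
        cases h2 : t.dropWhile (fun w => w == v) with
        | nil => simp
        | cons w0 rest =>
            have hne : t.dropWhile (fun w => w == v) ≠ [] := by simp [h2]
            have hh := List.head_dropWhile_not (fun w => w == v) hne
            have hw0ne : w0 ≠ v := by
              have hhead : (t.dropWhile (fun w => w == v)).head hne = w0 := by
                simp [h2]
              rw [hhead] at hh; simpa using hh
            have hw0t : w0 ∈ t := (List.dropWhile_sublist _).mem (h2 ▸ List.mem_cons_self)
            have hvw0 : v < w0 := lt_of_le_of_ne (hvle w0 hw0t) (Ne.symm hw0ne)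
            intro w hw
            rcases List.mem_cons.mp hw with rfl | hw
            · exact hvw0
            · exact lt_of_lt_of_le hvw0 ((List.pairwise_cons.mp (h2 ▸ hs2)).1 w hw)
      have hvnot2 : v ∉ t.dropWhile (fun w => w == v) := fun h => lt_irrefl v (hvlt v h)
      have h1cnt : (t.takeWhile (fun w => w == v)).count v
          = (t.takeWhile (fun w => w == v)).length :=
        List.count_eq_length.mpr (fun b hb => (ht1v b hb).symm)
      have h0cnt : (t.dropWhile (fun w => w == v)).count v = 0 := List.count_eq_zero.mpr hvnot2
      have hct : t.count v = (t.takeWhile (fun w => w == v)).length := by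
        conv_lhs => rw [← htsplit]
        rw [List.count_append, h1cnt, h0cnt]
        omega
      have hcv : (v :: t).count v = (t.takeWhile (fun w => w == v)).length + 1 := by
        simp [hct]
      have hck : ∀ k ∈ t.dropWhile (fun w => w == v),
          (v :: t).count k = (t.dropWhile (fun w => w == v)).count k := by
        intro k hk
        have hkv : k ≠ v := fun he => lt_irrefl v (he ▸ hvlt k hk)
        have h1 : (t.takeWhile (fun w => w == v)).count k = 0 :=
          List.count_eq_zero.mpr (fun h => hkv (ht1v k h))
        have hctk : t.count k = (t.dropWhile (fun w => w == v)).count k := by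
          conv_lhs => rw [← htsplit]
          rw [List.count_append, h1]
          omega
        simp [hctk, Ne.symm hkv]
      obtain ⟨ihmem, ihpw⟩ := ih hs2
      have hsub2 : (t.dropWhile (fun w => w == v)).Sublist t := List.dropWhile_sublist _
      constructor
      · intro p
        rw [pvRuns]
        constructor
        · intro hp
          rcases List.mem_cons.mp hp with rfl | hp
          · exact ⟨List.mem_cons_self, by simp [hcv]⟩
          · obtain ⟨h1, h2⟩ := (ihmem p).mp hp
            exact ⟨List.mem_cons_of_mem _ (hsub2.mem h1), by rw [h2, hck p.1 h1]⟩
        · rintro ⟨h1, h2⟩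
          by_cases hpv : p.1 = v
          · have hp2 : p.2 = (((t.takeWhile (fun w => w == v)).length + 1 : Nat) : Int) := by
              rw [h2, hpv, hcv]
            have hpeq : p = (v, (((t.takeWhile (fun w => w == v)).length + 1 : Nat) : Int)) :=
              Prod.ext hpv hp2
            rw [hpeq]
            exact List.mem_cons_self
          · have hp1t : p.1 ∈ t := by
              rcases List.mem_cons.mp h1 with h | h
              · exact absurd h hpv
              · exact h
            have hp1t2 : p.1 ∈ t.dropWhile (fun w => w == v) := by
              rw [← htsplit] at hp1t
              rcases List.mem_append.mp hp1t with h | h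
              · exact absurd (ht1v _ h) hpv
              · exact h
            exact List.mem_cons_of_mem _
              ((ihmem p).mpr ⟨hp1t2, by rw [h2, hck p.1 hp1t2]⟩)
      · rw [pvRuns]
        refine List.pairwise_cons.mpr ⟨?_, ihpw⟩
        intro q hq
        exact hvlt q.1 ((ihmem q).mp hq).1
theorem pvRuns_perm (vals : List Int) (hs : vals.Pairwise (· ≤ ·)) :
    (pvRuns vals).Perm
      ((PySem.Set.ofList vals).map (fun k => (k, (vals.count k : Int)))) := by
  obtain ⟨hmem, hlt⟩ := pvRuns_spec vals hs
  refine (List.perm_ext_iff_of_nodup ?_ ?_).mpr ?_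
  · exact List.Pairwise.imp (S := Ne)
      (fun {a b} h => fun he => by rw [he] at h; exact lt_irrefl _ h) hlt
  · exact (PySem.Set.nodup_ofList vals).map (fun a b h => (Prod.mk.injEq _ _ _ _ ▸ h : _ ∧ _).1)
  · intro p
    rw [hmem p]
    constructor
    · rintro ⟨h1, h2⟩
      exact List.mem_map.mpr ⟨p.1, (PySem.Set.mem_ofList vals p.1).mpr h1,
        by rw [← h2]⟩
    · rintro hp
      rcases List.mem_map.mp hp with ⟨k, hk, rfl⟩
      exact ⟨(PySem.Set.mem_ofList vals k).mp hk, rfl⟩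

-- per-row agreement of the two pipelines
theorem foldl_pairs_flatten (l : List (Int × Int)) :
    l.foldl (fun acc p => acc ++ [p.1] ++ [p.2]) [] = l.flatMap (fun p => [p.1, p.2]) := by
  have he : (fun (acc : List Int) (p : Int × Int) => acc ++ [p.1] ++ [p.2])
      = (fun acc p => acc ++ [p.1, p.2]) := by
    funext acc p; simp
  rw [he, PySem.List.foldl_append_eq_flatMap]
  simp

theorem row_eq (row : List Int) : pvNewRowA row = pvRowB row := by
  have h1 : (PySem.List.sorted (row.filter (fun v => v != 0)) (fun x => x) false).Perm
      (row.filter (fun v => v != 0)) := PySem.List.sorted_perm _ _ _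
  have hpw : (PySem.List.sorted (row.filter (fun v => v != 0)) (fun x => x) false).Pairwise
      (· ≤ ·) := by
    simpa using PySem.List.sorted_pairwise (row.filter (fun v => v != 0)) (fun x => x)
  have hfun : (fun k : Int =>
        (k, ((PySem.List.sorted (row.filter (fun v => v != 0)) (fun x => x) false).count k : Int)))
      = (fun k : Int => (k, ((row.filter (fun v => v != 0)).count k : Int))) := by
    funext k; rw [h1.count_eq]
  have hset : (PySem.Set.ofList
        (PySem.List.sorted (row.filter (fun v => v != 0)) (fun x => x) false)).Perm
      (PySem.Set.ofList (row.filter (fun v => v != 0))) := by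
    refine (List.perm_ext_iff_of_nodup (PySem.Set.nodup_ofList _) (PySem.Set.nodup_ofList _)).mpr ?_
    intro a; rw [PySem.Set.mem_ofList, PySem.Set.mem_ofList]; exact h1.mem_iff
  have hperm : ((PySem.Dict.counter (row.filter (fun v => v != 0))).items).Perm
      (pvRuns (PySem.List.sorted (row.filter (fun v => v != 0)) (fun x => x) false)) := by
    rw [PySem.Dict.items_counter]
    have step1 := pvRuns_perm
      (PySem.List.sorted (row.filter (fun v => v != 0)) (fun x => x) false) hpw
    rw [hfun] at step1
    exact (step1.trans (hset.map _)).symm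
  show (PySem.List.sorted2 ((PySem.Dict.counter (row.filter (fun n => n != 0))).items)
      (fun x => x.2) (fun x => x.1)).foldl (fun acc p => acc ++ [p.1] ++ [p.2]) []
    = (PySem.List.sorted2
        (pvRuns (PySem.List.sorted (row.filter (fun v => v != 0)) (fun x => x) false))
        (fun p => p.2) (fun p => p.1)).flatMap (fun p => [p.1, p.2])
  rw [sorted2_eq_of_perm _ _ hperm, foldl_pairs_flatten]

-- fold-max over nonnegative ints equals Python's max(..., default=0)
theorem foldl_max_eq_maxD (l : List Int) (h : ∀ x ∈ l, 0 ≤ x) :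
    l.foldl max 0 = PySem.List.maxD l (fun x => x) 0 := by
  cases l with
  | nil => simp [PySem.List.maxD, PySem.List.max?]
  | cons x t =>
      rw [show PySem.List.maxD (x :: t) (fun x => x) 0
            = (PySem.List.max? (x :: t) (fun x => x)).getD 0 from rfl,
          PySem.List.max?_id_cons]
      simp only [List.foldl_cons, Option.getD_some]
      rw [max_eq_right (h x List.mem_cons_self)]

theorem take100_of_if (l : List (List Int)) :
    (if PySem.List.len l > 100 then l.take 100 else l) = l.take 100 := by
  rw [PySem.List.len_eq]
  split_ifs with h
  · rfl
  · rw [List.take_of_length_le (by omega)]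

theorem pad_row_eq (M : Int) (r : List Int) :
    (let row2 := r ++ PySem.List.pyRepeat [0] (M - PySem.List.len r);
     if PySem.List.len row2 > 100 then row2.take 100 else row2)
    = (r ++ PySem.List.pyRepeat [0] (M - PySem.List.len r)).take 100 := by
  show (if PySem.List.len (r ++ PySem.List.pyRepeat [0] (M - PySem.List.len r)) > 100
      then (r ++ PySem.List.pyRepeat [0] (M - PySem.List.len r)).take 100
      else (r ++ PySem.List.pyRepeat [0] (M - PySem.List.len r))) = _
  rw [PySem.List.len_eq]
  split_ifs with h
  · rfl
  · rw [List.take_of_length_le (by omega)]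

theorem R_operation_spec' (A : List (List Int)) : R_operation A = R_operation_alt A := by
  have hst : A.foldl (fun (s : List (List Int) × Int) row =>
      (s.1 ++ [pvNewRowA row], max s.2 (PySem.List.len (pvNewRowA row)))) ([], 0)
      = (A.foldl (fun l row => l ++ [pvNewRowA row]) [],
         A.foldl (fun m row => max m (PySem.List.len (pvNewRowA row))) 0) :=
    PySem.List.foldl_prod_mk (fun (l : List (List Int)) row => l ++ [pvNewRowA row])
      (fun (m : Int) row => max m (PySem.List.len (pvNewRowA row))) A [] (0 : Int)
  have hfst : A.foldl (fun l row => l ++ [pvNewRowA row]) [] = A.map pvRowB := by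
    rw [PySem.List.foldl_append_singleton_eq_map]
    simp only [List.nil_append]
    exact List.map_congr_left (fun r _ => row_eq r)
  have hsnd : A.foldl (fun m row => max m (PySem.List.len (pvNewRowA row))) 0
      = PySem.List.maxD ((A.map pvRowB).map (fun r => PySem.List.len r)) (fun x => x) 0 := by
    rw [← foldl_max_eq_maxD _ (by
      intro x hx
      rcases List.mem_map.mp hx with ⟨r, _, rfl⟩
      rw [PySem.List.len_eq]
      exact Int.natCast_nonneg _)]
    rw [List.map_map, List.foldl_map]
    have hfuneq : (fun (m : Int) (row : List Int) => max m (PySem.List.len (pvNewRowA row)))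
        = (fun (m : Int) (row : List Int) =>
            max m (((fun r => PySem.List.len r) ∘ pvRowB) row)) := by
      funext m row; rw [row_eq]; rfl
    rw [hfuneq]
  unfold R_operation R_operation_alt
  simp only [hst, hfst, hsnd]
  rw [take100_of_if, ← List.map_take]
  exact List.map_congr_left (fun r _ => pad_row_eq _ r)

-- ===== VERDICT (by name: the statement is the Claim_ definition above) =====
theorem R_operation_spec : Claim_equal_R_operation := by
  intro A _
  unfold Spec_R_operation
  exact R_operation_spec' A
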